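-- pv_equiv track=rewrite | github.com/vladmandic/automatic | modules/api/nvml.py | get_reason
-- ===== SOURCE A (Python) =====
-- def get_reason(val):
--     throttle = {
--         1: 'gpu idle',
--         2: 'applications clocks setting',
--         4: 'sw power cap',
--         8: 'hw slowdown',
--         16: 'sync boost',
--         32: 'sw thermal slowdown',
--         64: 'hw thermal slowdown',
--         128: 'hw power brake slowdown',
--         256: 'display clock setting',
--     }
--     reason = ', '.join([throttle[i] for i in throttle if i & val])
--     return reason if len(reason) > 0 else 'ok'
-- ===== SOURCE B (Python) =====
-- def get_reason(val):
--     names = ['gpu idle', 'applications clocks setting', 'sw power cap',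
--              'hw slowdown', 'sync boost', 'sw thermal slowdown',
--              'hw thermal slowdown', 'hw power brake slowdown',
--              'display clock setting']
--     m = val & 511
--     parts = []
--     while m:
--         low = m & -m
--         m &= m - 1
--         parts.append(names[low.bit_length() - 1])
--     return ', '.join(parts) if parts else 'ok'
-- ===== Notes on version B (the rewrite author's own statement) =====
-- stated objective: alternative
-- what changed: B masks val down to the table's bit range and then iterates over its set bits directly (extract the lowest set bit, clear it, index a name list by bit position) instead of scanning the fixed mask table and testing every key against val.
import Mathlib
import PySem

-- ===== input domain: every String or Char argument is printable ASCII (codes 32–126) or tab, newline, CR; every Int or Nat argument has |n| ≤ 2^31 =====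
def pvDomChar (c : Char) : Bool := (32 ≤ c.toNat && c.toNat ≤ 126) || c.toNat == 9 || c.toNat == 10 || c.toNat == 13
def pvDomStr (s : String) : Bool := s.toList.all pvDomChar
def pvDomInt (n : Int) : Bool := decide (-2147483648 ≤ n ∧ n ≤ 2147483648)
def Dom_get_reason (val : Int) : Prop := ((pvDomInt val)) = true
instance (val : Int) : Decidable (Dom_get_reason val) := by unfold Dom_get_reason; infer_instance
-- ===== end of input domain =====

-- B iterates over the set bits of val & 511 (lowest first) instead of scanning the fixed
-- 9-entry mask table and testing each bit; objective: alternative decomposition, same cost.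

-- ===== PORT A =====
-- A's throttle dict: insertion-ordered association list of (mask, name)
def throttleA : List (Int × String) :=
  [(1, "gpu idle"), (2, "applications clocks setting"), (4, "sw power cap"),
   (8, "hw slowdown"), (16, "sync boost"), (32, "sw thermal slowdown"),
   (64, "hw thermal slowdown"), (128, "hw power brake slowdown"),
   (256, "display clock setting")]

def get_reason (val : Int) : String :=
  -- reason = ', '.join([throttle[i] for i in throttle if i & val])
  let reason := PySem.Str.join ", "
    ((throttleA.filter (fun p => PySem.Int.band p.1 val ≠ 0)).map (fun p => p.2))
  if PySem.Str.len reason > 0 then reason else "ok"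

-- ===== PORT B =====
def bNames : List String :=
  ["gpu idle", "applications clocks setting", "sw power cap", "hw slowdown",
   "sync boost", "sw thermal slowdown", "hw thermal slowdown",
   "hw power brake slowdown", "display clock setting"]

-- the while loop of Source B; m = val & 511 has at most 9 set bits, so fuel 10 never runs out
def bLoop (fuel : Nat) (m : Int) (parts : List String) : List String :=
  match fuel with
  | 0 => parts
  | fuel + 1 =>
    if m ≠ 0 then
      let low := PySem.Int.band m (-m)
      let m' := PySem.Int.band m (m - 1)
      bLoop fuel m' (parts ++ [PySem.List.pyGetD bNames ((PySem.Int.bitLength low : Int) - 1) ""])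
    else parts

def get_reason_alt (val : Int) : String :=
  let parts := bLoop 10 (PySem.Int.band val 511) []
  if parts ≠ [] then PySem.Str.join ", " parts else "ok"

-- ===== PRECONDITION & SPEC =====
def Spec_get_reason (val : Int) (out : String) : Prop := out = get_reason_alt val
instance (val : Int) (out : String) : Decidable (Spec_get_reason val out) := by unfold Spec_get_reason; infer_instance

-- ===== CLAIM (what is proved, stated in full; the proofs are below) =====
def Claim_equal_get_reason : Prop := ∀ (val : Int), Dom_get_reason val → Spec_get_reason val (get_reason val)

-- ===== LEMMAS AND PROOFS =====

-- the name of bit k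
def pvName (i : Int) : String := PySem.List.pyGetD bNames i ""

-- the index trace of Source B's while loop
def pvILoop : Nat → Int → List Int
  | 0, _ => []
  | fuel + 1, m =>
    if m ≠ 0 then
      ((PySem.Int.bitLength (PySem.Int.band m (-m)) : Int) - 1) ::
        pvILoop fuel (PySem.Int.band m (m - 1))
    else []

-- the selected bit indices of a residue, ascending
def pvSel (n : Nat) : List Int :=
  ((List.range 9).filter (fun k => n.testBit k)).map Int.ofNat

theorem pv_and_511 (n : Nat) : n &&& 511 = n % 512 := by
  have h : (511 : Nat) = 2 ^ 9 - 1 := by norm_num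
  have h2 : (512 : Nat) = 2 ^ 9 := by norm_num
  rw [h, h2, Nat.and_two_pow_sub_one_eq_mod]

-- only the low 9 bits of the second operand matter when the first is below 512
theorem pv_and_mod (i t : Nat) (hi : i < 512) : i &&& t = i &&& (t % 512) := by
  apply Nat.eq_of_testBit_eq
  intro k
  by_cases hk : k < 9
  · have h9 : (t % 512).testBit k = t.testBit k := by
      have := Nat.testBit_mod_two_pow t 9 k
      norm_num [hk] at this
      exact this
    simp [Nat.testBit_and, h9]
  · have hz : i.testBit k = false := Nat.testBit_eq_false_of_lt (lt_of_lt_of_le hi (by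
      calc (512 : Nat) = 2 ^ 9 := by norm_num
        _ ≤ 2 ^ k := Nat.pow_le_pow_right (by norm_num) (by omega)))
    simp [Nat.testBit_and, hz]

-- band with 511 is the Python residue mod 512
theorem pv_band_511 (val : Int) : PySem.Int.band val 511 = val % 512 := by
  cases val with
  | ofNat n =>
    rw [show ((Int.ofNat n) = (n : Int)) from rfl, show ((511 : Int) = ((511 : Nat) : Int)) from rfl,
      PySem.Int.band_natCast, pv_and_511]
    push_cast
    rfl
  | negSucc t =>
    have h1 : PySem.Int.band (Int.negSucc t) 511 = ((511 - (511 &&& t) : Nat) : Int) := by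
      rw [PySem.Int.band.eq_1]
      norm_num [Int.negSucc_eq]
      rw [if_neg (by omega)]
      norm_num
      rfl
    rw [h1, show (511 &&& t) = t % 512 from by rw [Nat.land_comm, pv_and_511],
      Int.negSucc_eq]
    have := Nat.mod_lt t (show 0 < 512 by norm_num)
    omega

-- subtracting the overlapped bits of a key = masking with the 9-bit complement
set_option maxRecDepth 20000 in
theorem pv_sub_and (k u : Nat) (hk : k < 9) (hu : u < 512) :
    2 ^ k - (2 ^ k &&& u) = 2 ^ k &&& (511 - u) := by
  have hx : 511 - u = 511 ^^^ u := by
    revert hu; revert u; decide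
  have hlt : (2 : Nat) ^ k < 512 := by
    have := Nat.pow_lt_pow_right (show 1 < 2 by norm_num) hk; omega
  rw [hx, show (511 : Nat) = 2 ^ 9 - 1 by norm_num,
    Nat.and_xor_distrib_left, Nat.and_two_pow_sub_one_eq_mod, Nat.mod_eq_of_lt (by omega),
    Nat.two_pow_and]
  cases h : u.testBit k
  · simp
  · simp

theorem pv_cast_and_ne (k n : Nat) : (((2 ^ k &&& n : Nat) : Int) ≠ 0) ↔ n.testBit k := by
  rw [Nat.two_pow_and]
  cases h : n.testBit k <;> simp

-- each table test sees only bit k of the residue val % 512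
theorem pv_test (k : Nat) (hk : k < 9) (val : Int) :
    (PySem.Int.band ((2 ^ k : Nat) : Int) val ≠ 0) ↔ ((val % 512).toNat.testBit k) := by
  cases val with
  | ofNat m =>
    rw [show ((Int.ofNat m) = (m : Int)) from rfl, PySem.Int.band_natCast,
      pv_and_mod _ m (by have := Nat.pow_lt_pow_right (show 1 < 2 by norm_num) hk; omega)]
    have h2 : (((m : Int)) % 512).toNat = m % 512 := by omega
    rw [h2, pv_cast_and_ne]
  | negSucc t =>
    have h1 : PySem.Int.band ((2 ^ k : Nat) : Int) (Int.negSucc t) =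
        ((2 ^ k - (2 ^ k &&& t) : Nat) : Int) := by
      rw [PySem.Int.band.eq_1]
      norm_num [Int.negSucc_eq]
      rw [if_neg (by omega)]
      norm_num
      rfl
    have hklt : (2 : Nat) ^ k < 512 := by
      have := Nat.pow_lt_pow_right (show 1 < 2 by norm_num) hk; omega
    have hu : t % 512 < 512 := Nat.mod_lt t (by norm_num)
    rw [h1, pv_and_mod _ t hklt, pv_sub_and k (t % 512) hk hu]
    have h2 : ((Int.negSucc t) % 512).toNat = 511 - t % 512 := by
      rw [Int.negSucc_eq]; omega
    rw [h2, pv_cast_and_ne]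

-- the throttle table is the name table indexed by the powers of two
theorem pv_tableA : throttleA = (List.range 9).map
    (fun k => (((2 ^ k : Nat) : Int), pvName (k : Nat))) := by
  decide

-- Source B's loop is its index trace rendered through the name table
theorem pv_bLoop_iLoop (fuel : Nat) : ∀ (m : Int) (parts : List String),
    bLoop fuel m parts = parts ++ (pvILoop fuel m).map pvName := by
  induction fuel with
  | zero => intro m parts; simp [bLoop, pvILoop]
  | succ fuel ih =>
    intro m parts
    by_cases h : m = 0
    · simp [bLoop, pvILoop, h]
    · simp only [bLoop, pvILoop, if_pos h, ih]
      simp [pvName]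

-- on residues, the index trace is exactly the ascending selected bits
set_option maxRecDepth 100000 in
theorem pv_iLoop_sel : ∀ n : Nat, n < 512 → pvILoop 10 (n : Int) = pvSel n := by
  decide

-- a ", "-join of a nonempty list whose head is nonempty is nonempty
theorem pv_join_pos (a : String) (l : List String) (ha : 0 < a.toList.length) :
    0 < PySem.Str.len (PySem.Str.join ", " (a :: l)) := by
  cases l with
  | nil =>
    rw [PySem.Str.len_eq, PySem.Str.toList_join]
    simp only [List.map, PySem.Chars.join_singleton]
    omega
  | cons b rest =>
    rw [PySem.Str.len_eq, PySem.Str.toList_join]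
    simp only [List.map, PySem.Chars.join_cons_cons, List.length_append]
    push_cast
    omega

-- every selected name is nonempty
theorem pv_name_pos (k : Nat) (hk : k < 9) : 0 < (pvName (k : Nat)).toList.length := by
  interval_cases k <;> decide

-- ===== VERDICT (by name: the statement is the Claim_ definition above) =====
theorem get_reason_spec : Claim_equal_get_reason := by
  intro val _
  unfold Spec_get_reason
  have h0 : 0 ≤ val % 512 := Int.emod_nonneg val (by norm_num)
  have h1 : val % 512 < 512 := Int.emod_lt_of_pos val (by norm_num)
  set n : Nat := (val % 512).toNat with hn
  have hn512 : n < 512 := by omega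
  have hcast : val % 512 = (n : Int) := by omega
  have hA : (throttleA.filter (fun p => PySem.Int.band p.1 val ≠ 0)).map (fun p => p.2)
      = (pvSel n).map pvName := by
    rw [pv_tableA, List.filter_map, List.filter_congr (q := fun k => n.testBit k)
      (by intro k hkmem
          have hk : k < 9 := List.mem_range.mp hkmem
          simp only [Function.comp]
          rw [Bool.eq_iff_iff]
          simp only [decide_eq_true_eq]
          rw [pv_test k hk val, hn])]
    unfold pvSel
    rw [List.map_map, List.map_map]
    apply List.map_congr_left
    intro k _
    rfl
  have hB : bLoop 10 (PySem.Int.band val 511) [] = (pvSel n).map pvName := by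
    rw [pv_band_511, hcast, pv_bLoop_iLoop, pv_iLoop_sel n hn512]
    simp
  show get_reason val = get_reason_alt val
  unfold get_reason get_reason_alt
  rw [hA, hB]
  cases hsel : pvSel n with
  | nil => decide
  | cons i rest =>
    have hi : ∃ k : Nat, k < 9 ∧ i = (k : Int) := by
      have hmem : i ∈ pvSel n := by rw [hsel]; exact List.mem_cons_self
      simp only [pvSel, List.mem_map, List.mem_filter, List.mem_range] at hmem
      rcases hmem with ⟨k, ⟨hk9, _⟩, hki⟩
      exact ⟨k, hk9, hki.symm⟩
    rcases hi with ⟨k, hk9, hik⟩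
    simp only [List.map]
    have hpos := pv_join_pos (pvName i) (rest.map pvName)
      (by rw [hik]; exact pv_name_pos k hk9)
    rw [if_pos (by omega), if_pos (by simp)]
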